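-- pv_equiv track=rewrite | github.com/JeeVeeVee/problem_solving | code_wars/find_smallest.py | get_index_smallest
-- ===== SOURCE A (Python) =====
-- def get_index_smallest(i):
--     output = 0
--     cur_min = int(str(i)[0])
--     teller = 0
--     for j in str(i):
--         if int(j) < cur_min:
--             cur_min = int(j)
--             output = teller
--         teller += 1
--     return output
-- ===== SOURCE B (Python) =====
-- def get_index_smallest(i):
--     digits = [int(c) for c in str(i)]
--     return digits.index(min(digits))
-- ===== Notes on version B (the rewrite author's own statement) =====
-- stated objective: simpler
-- what changed: Replaces A's single fused loop tracking running minimum, its index and a counter with three explicit branches by: build the digit list once, then min() and a separate .index() scan for the first occurrence.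
import Mathlib
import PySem

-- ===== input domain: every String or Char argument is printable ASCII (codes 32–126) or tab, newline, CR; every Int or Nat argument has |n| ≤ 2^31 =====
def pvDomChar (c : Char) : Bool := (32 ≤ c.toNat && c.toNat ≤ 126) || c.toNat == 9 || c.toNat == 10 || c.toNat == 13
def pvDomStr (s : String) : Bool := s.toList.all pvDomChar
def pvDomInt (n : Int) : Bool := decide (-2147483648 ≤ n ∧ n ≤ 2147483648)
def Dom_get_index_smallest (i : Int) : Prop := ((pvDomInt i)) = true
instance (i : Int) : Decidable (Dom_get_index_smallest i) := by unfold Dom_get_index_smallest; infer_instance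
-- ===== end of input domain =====

-- B replaces A's fused min/index-tracking loop by building the digit list once, then min() and a
-- separate first-occurrence .index() scan; objective: simpler.

-- int(c) for a single character c: exact for digit chars '0'-'9'; Pre_ restricts to i ≥ 0,
-- where str(i) consists of digits only (on other chars Python's int() raises ValueError).
def pyDigit (c : Char) : Int := (c.toNat : Int) - 48

-- ===== PORT A =====
-- loop body of A: state (output, cur_min, teller), x = int(j)
def aStep (st : Int × Int × Int) (x : Int) : Int × Int × Int :=
  if x < st.2.1 then (st.2.2, x, st.2.2 + 1) else (st.1, st.2.1, st.2.2 + 1)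

def get_index_smallest (i : Int) : Int :=
  let s := (PySem.Int.toStr i).toList
  -- cur_min = int(str(i)[0]); str(i) is never empty, so headD's default is never used
  let curMin0 := pyDigit (s.headD '0')
  (s.foldl (fun st j => aStep st (pyDigit j)) (0, curMin0, 0)).1

-- ===== PORT B =====
def get_index_smallest_alt (i : Int) : Int :=
  let digits := ((PySem.Int.toStr i).toList).map pyDigit
  -- min(digits): digits is nonempty, so getD's default is never used
  let m := (PySem.List.min? digits (fun y => y)).getD 0
  -- digits.index(m): m ∈ digits, so getD's default is never used
  (((PySem.List.index? digits m).getD 0 : Nat) : Int)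

-- ===== PRECONDITION & SPEC =====
-- Pre_ excludes i < 0, where A raises ValueError (int('-') on the sign character); B raises there too.
def Pre_get_index_smallest (i : Int) : Prop := 0 ≤ i
instance (i : Int) : Decidable (Pre_get_index_smallest i) := by unfold Pre_get_index_smallest; infer_instance
def pvWitness_get_index_smallest : Int := 102

def Spec_get_index_smallest (i : Int) (out : Int) : Prop := out = get_index_smallest_alt i
instance (i : Int) (out : Int) : Decidable (Spec_get_index_smallest i out) := by unfold Spec_get_index_smallest; infer_instance

-- ===== CLAIM (what is proved, stated in full; the proofs are below) =====
def Claim_equal_get_index_smallest : Prop := ∀ (i : Int), Dom_get_index_smallest i → Pre_get_index_smallest i → Spec_get_index_smallest i (get_index_smallest i)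

-- ===== LEMMAS AND PROOFS =====

theorem foldl_min_assoc : ∀ (s : List Int) (a b : Int),
    s.foldl min (min a b) = min a (s.foldl min b) := by
  intro s
  induction s with
  | nil => intro a b; rfl
  | cons c s ih =>
    intro a b
    show s.foldl min (min (min a b) c) = min a ((c :: s).foldl min b)
    rw [min_assoc, ih]
    rfl

theorem foldl_min_le : ∀ (s : List Int) (a : Int), s.foldl min a ≤ a := by
  intro s
  induction s with
  | nil => intro a; exact le_refl a
  | cons c s ih =>
    intro a
    show s.foldl min (min a c) ≤ a
    calc s.foldl min (min a c) ≤ min a c := ih _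
      _ ≤ a := min_le_left _ _

theorem foldl_min_mem : ∀ (s : List Int) (a : Int),
    s.foldl min a = a ∨ s.foldl min a ∈ s := by
  intro s
  induction s with
  | nil => intro a; exact Or.inl rfl
  | cons c s ih =>
    intro a
    have hfc : (c :: s).foldl min a = s.foldl min (min a c) := rfl
    rcases ih (min a c) with h | h
    · rcases le_total a c with hac | hca
      · left; rw [hfc, h, min_eq_left hac]
      · right; rw [hfc, h, min_eq_right hca]; exact List.mem_cons_self
    · right; rw [hfc]; exact List.mem_cons_of_mem _ h

-- the first occurrence of the minimum exists in the list
theorem idx_min_some (b : Int) (s : List Int) :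
    ∃ k, PySem.List.index? (b :: s) (s.foldl min b) = some k := by
  have hmem : s.foldl min b ∈ b :: s := by
    rcases foldl_min_mem s b with h | h
    · rw [h]; exact List.mem_cons_self
    · exact List.mem_cons_of_mem _ h
  have := (PySem.List.index?_isSome_iff (xs := b :: s) (v := s.foldl min b)).mpr hmem
  exact Option.isSome_iff_exists.mp this

-- A's fold computes: if the list minimum beats cm, the (offset) first index of the minimum, else out.
theorem aFold_spec : ∀ (r : List Int) (a out cm t : Int),
    ((a :: r).foldl aStep (out, cm, t)).1 =
      if r.foldl min a < cm
      then t + (((PySem.List.index? (a :: r) (r.foldl min a)).getD 0 : Nat) : Int)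
      else out := by
  intro r
  induction r with
  | nil =>
    intro a out cm t
    by_cases hac : a < cm
    · simp [aStep, hac]
    · simp [aStep, hac]
  | cons b s ih =>
    intro a out cm t
    have hfold : (b :: s).foldl min a = min a (s.foldl min b) := by
      show s.foldl min (min a b) = _
      rw [foldl_min_assoc]
    obtain ⟨k, hk⟩ := idx_min_some b s
    have hstep : (a :: b :: s).foldl aStep (out, cm, t)
        = (b :: s).foldl aStep (aStep (out, cm, t) a) := rfl
    by_cases hac : a < cm
    · have hst : aStep (out, cm, t) a = (t, a, t + 1) := by simp [aStep, hac]
      rw [hstep, hst, ih]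
      by_cases hm : s.foldl min b < a
      · have hmin : (b :: s).foldl min a = s.foldl min b := by
          rw [hfold, min_eq_right (le_of_lt hm)]
        have hne : a ≠ s.foldl min b := (ne_of_lt hm).symm
        have hidx : PySem.List.index? (a :: b :: s) (s.foldl min b) = some (k + 1) := by
          rw [PySem.List.index?_cons_of_ne _ hne, hk]; rfl
        rw [hmin]
        simp only [if_pos hm, if_pos (lt_trans hm hac), hk, hidx, Option.getD_some]
        push_cast; ring
      · have hmin : (b :: s).foldl min a = a := by
          rw [hfold, min_eq_left (le_of_not_gt hm)]
        rw [hmin, if_neg hm, if_pos hac, PySem.List.index?_cons_self]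
        simp
    · have hst : aStep (out, cm, t) a = (out, cm, t + 1) := by simp [aStep, hac]
      rw [hstep, hst, ih]
      have hcma : cm ≤ a := le_of_not_gt hac
      by_cases hm : s.foldl min b < cm
      · have hma : s.foldl min b < a := lt_of_lt_of_le hm hcma
        have hmin : (b :: s).foldl min a = s.foldl min b := by
          rw [hfold, min_eq_right (le_of_lt hma)]
        have hne : a ≠ s.foldl min b := (ne_of_lt hma).symm
        have hidx : PySem.List.index? (a :: b :: s) (s.foldl min b) = some (k + 1) := by
          rw [PySem.List.index?_cons_of_ne _ hne, hk]; rfl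
        rw [hmin]
        simp only [if_pos hm, hk, hidx, Option.getD_some]
        push_cast; ring
      · have hmin : ¬ (b :: s).foldl min a < cm := by
          rw [hfold]
          rcases le_total a (s.foldl min b) with h | h
          · rw [min_eq_left h]; exact hac
          · rw [min_eq_right h]; exact hm
        rw [if_neg hm, if_neg hmin]

theorem toChars_ne_nil (i : Int) : PySem.Int.toChars i ≠ [] := by
  unfold PySem.Int.toChars
  split
  · simp
  · have := Nat.length_toDigits_pos (b := 10) (n := i.toNat)
    intro h
    rw [h] at this
    simp at this

theorem get_index_smallest_eq_alt (i : Int) :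
    get_index_smallest i = get_index_smallest_alt i := by
  unfold get_index_smallest get_index_smallest_alt
  rw [PySem.Int.toList_toStr]
  cases hs : PySem.Int.toChars i with
  | nil => exact absurd hs (toChars_ne_nil i)
  | cons c cs =>
    simp only [List.headD_cons, List.map_cons]
    rw [← List.foldl_map (f := pyDigit) (g := aStep)]
    rw [List.map_cons, aFold_spec, PySem.List.min?_id_cons]
    simp only [Option.getD_some]
    by_cases hm : (cs.map pyDigit).foldl min (pyDigit c) < pyDigit c
    · simp only [if_pos hm, zero_add]
    · have heq : (cs.map pyDigit).foldl min (pyDigit c) = pyDigit c :=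
        le_antisymm (foldl_min_le _ _) (le_of_not_gt hm)
      rw [if_neg hm, heq, PySem.List.index?_cons_self]
      simp

-- ===== VERDICT (by name: the statement is the Claim_ definition above) =====
theorem get_index_smallest_spec : Claim_equal_get_index_smallest := by
  intro i _ _
  unfold Spec_get_index_smallest
  exact get_index_smallest_eq_alt i
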